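-- pv_equiv track=rewrite | github.com/no-logo/ITStepZadaniaDomowe | Module_Functions_Part_1.py | count_upper_lower_chars
-- ===== SOURCE A (Python) =====
-- def count_upper_lower_chars(input_string):
--     upper_count = 0
--     lower_count = 0
--     other_count = 0
--     for char in input_string:
--         if char.isupper():
--             upper_count += 1
--         if char.islower():
--             lower_count += 1
--         if  not char.isalpha():
--             other_count += 1
--     output_dict = {'uppercase' : upper_count, 'upper_count' : lower_count, 'other' : other_count}
--     return output_dict
-- ===== SOURCE B (Python) =====
-- def count_upper_lower_chars(input_string):
--     upper = sum(c.isupper() for c in input_string)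
--     lower = sum(c.islower() for c in input_string)
--     other = sum(not c.isalpha() for c in input_string)
--     return {'uppercase': upper, 'upper_count': lower, 'other': other}
-- ===== Notes on version B (the rewrite author's own statement) =====
-- stated objective: alternative
-- what changed: Replaces the single fused three-accumulator loop with three independent sum-over-generator passes, one per count, keeping the original (mislabeled) dict keys.
import Mathlib
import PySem

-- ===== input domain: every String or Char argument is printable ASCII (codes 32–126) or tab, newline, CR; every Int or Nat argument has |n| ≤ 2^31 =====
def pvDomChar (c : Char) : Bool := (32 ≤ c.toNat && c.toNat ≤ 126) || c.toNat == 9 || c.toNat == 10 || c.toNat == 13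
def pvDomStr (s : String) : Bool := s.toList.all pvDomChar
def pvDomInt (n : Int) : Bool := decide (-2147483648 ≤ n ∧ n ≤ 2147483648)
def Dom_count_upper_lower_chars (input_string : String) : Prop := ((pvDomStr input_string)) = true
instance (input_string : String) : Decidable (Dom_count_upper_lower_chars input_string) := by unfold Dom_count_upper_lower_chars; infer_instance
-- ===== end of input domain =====

-- B replaces A's single fused three-accumulator loop by three independent sum-passes, one per count (objective: alternative decomposition; same O(n) cost).

-- ===== PORT A =====
-- A: one loop, three counters updated by three independent ifs, then the dict literal.
def pvStepA (acc : Int × Int × Int) (char : Char) : Int × Int × Int :=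
  let acc := if PySem.Chars.isupper char then (acc.1 + 1, acc.2.1, acc.2.2) else acc
  let acc := if PySem.Chars.islower char then (acc.1, acc.2.1 + 1, acc.2.2) else acc
  let acc := if !(PySem.Chars.isalpha char) then (acc.1, acc.2.1, acc.2.2 + 1) else acc
  acc

def count_upper_lower_chars (input_string : String) : List (String × Int) :=
  let st := input_string.toList.foldl pvStepA (0, 0, 0)
  [("uppercase", st.1), ("upper_count", st.2.1), ("other", st.2.2)]

-- ===== PORT B =====
-- B: sum(bool for c in s) = sum over the mapped 0/1 list; three separate passes.
def pvBoolSum (input_string : String) (p : Char → Bool) : Int :=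
  (input_string.toList.map (fun c => if p c then (1 : Int) else 0)).sum

def count_upper_lower_chars_alt (input_string : String) : List (String × Int) :=
  let upper := pvBoolSum input_string PySem.Chars.isupper
  let lower := pvBoolSum input_string PySem.Chars.islower
  let other := pvBoolSum input_string (fun c => !(PySem.Chars.isalpha c))
  [("uppercase", upper), ("upper_count", lower), ("other", other)]

-- ===== PRECONDITION & SPEC =====
def Spec_count_upper_lower_chars (input_string : String) (out : List (String × Int)) : Prop := out = count_upper_lower_chars_alt input_string
instance (input_string : String) (out : List (String × Int)) : Decidable (Spec_count_upper_lower_chars input_string out) := by unfold Spec_count_upper_lower_chars; infer_instance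

-- ===== CLAIM (what is proved, stated in full; the proofs are below) =====
def Claim_equal_count_upper_lower_chars : Prop := ∀ (input_string : String), Dom_count_upper_lower_chars input_string → Spec_count_upper_lower_chars input_string (count_upper_lower_chars input_string)

-- ===== LEMMAS AND PROOFS =====
-- A's fused fold, started from any accumulator, adds the three independent 0/1 sums componentwise.
theorem pv_fold_eq_sums (l : List Char) (a b c : Int) :
    l.foldl pvStepA (a, b, c)
    = (a + (l.map (fun ch => if PySem.Chars.isupper ch then (1 : Int) else 0)).sum,
       b + (l.map (fun ch => if PySem.Chars.islower ch then (1 : Int) else 0)).sum,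
       c + (l.map (fun ch => if !(PySem.Chars.isalpha ch) then (1 : Int) else 0)).sum) := by
  induction l generalizing a b c with
  | nil => simp
  | cons x xs ih =>
    simp only [List.foldl_cons, List.map_cons, List.sum_cons, pvStepA]
    split_ifs <;> simp only [ih] <;> simp <;> ring_nf <;> simp

-- ===== VERDICT (by name: the statement is the Claim_ definition above) =====
theorem count_upper_lower_chars_spec : Claim_equal_count_upper_lower_chars := by
  intro s _
  unfold Spec_count_upper_lower_chars count_upper_lower_chars count_upper_lower_chars_alt pvBoolSum
  simp [pv_fold_eq_sums]
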